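-- pv_equiv track=rewrite | github.com/Matteo-Candi/Master-Thesis | benchmark/Python_formatted.py | find_min_operations
-- ===== SOURCE A (Python) =====
-- def find_min_operations(arr, n, k):
--     operations = 0
--     for i in range(k):
--         freq = {}
--         for j in range(i, n, k):
--             freq[arr[j]] = freq.get(arr[j], 0) + 1
--         max1 = 0
--         num = 0
--         for key, value in freq.items():
--             if value > max1:
--                 max1 = value
--                 num = key
--         for key, value in freq.items():
--             if key != num:
--                 operations += value
--     return operations
-- ===== SOURCE B (Python) =====
-- def find_min_operations(arr, n, k):
--     operations = 0
--     for r in range(k):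
--         g = sorted(arr[r:n:k])
--         best = 0
--         run = 0
--         prev = None
--         for x in g:
--             run = run + 1 if x == prev else 1
--             prev = x
--             if run > best:
--                 best = run
--         operations += len(g) - best
--     return operations
-- ===== Notes on version B (the rewrite author's own statement) =====
-- stated objective: alternative
-- what changed: Replaces A's per-residue hash-map frequency counting (build dict, scan for argmax, sum non-argmax values) with slice-extract-then-sort per residue and a run-length scan of the sorted group whose longest run is the max multiplicity, adding group length minus that run.
-- outside the precondition, e.g. on find_min_operations([1, 2, 3], -1, 1): A returns 0, B returns 1; on find_min_operations([], 1, 1): A raises IndexError, B returns 0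
import Mathlib
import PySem

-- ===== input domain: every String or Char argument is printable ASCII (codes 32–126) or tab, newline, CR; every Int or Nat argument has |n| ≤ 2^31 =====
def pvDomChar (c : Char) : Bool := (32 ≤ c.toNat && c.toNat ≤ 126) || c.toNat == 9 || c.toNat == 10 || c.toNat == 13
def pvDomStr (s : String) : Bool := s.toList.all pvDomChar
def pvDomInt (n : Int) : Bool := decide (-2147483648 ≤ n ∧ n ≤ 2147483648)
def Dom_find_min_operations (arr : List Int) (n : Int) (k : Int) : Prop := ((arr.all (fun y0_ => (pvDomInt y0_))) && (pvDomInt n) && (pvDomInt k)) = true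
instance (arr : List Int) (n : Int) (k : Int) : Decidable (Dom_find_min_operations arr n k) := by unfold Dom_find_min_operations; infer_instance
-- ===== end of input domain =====

-- B replaces A's per-residue hash-map frequency counting (dict build, argmax scan, non-argmax
-- summation) with slice-then-sort per residue and a run-length scan of the sorted group, adding
-- group length minus the longest run (objective: alternative).

-- ===== PORT A =====
def find_min_operations (arr : List Int) (n : Int) (k : Int) : Int :=
  (PySem.List.pyRange 0 k 1).foldl (fun operations i =>
    let freq : PySem.Dict Int Int :=
      (PySem.List.pyRange i n k).foldl (fun freq j =>
        freq.insert (PySem.List.pyGetD arr j 0) (freq.getD (PySem.List.pyGetD arr j 0) 0 + 1))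
        PySem.Dict.empty
    let mn : Int × Int :=
      freq.items.foldl (fun mn kv => if kv.2 > mn.1 then (kv.2, kv.1) else mn) (0, 0)
    freq.items.foldl (fun operations kv => if kv.1 ≠ mn.2 then operations + kv.2 else operations)
      operations)
    0

-- ===== PORT B =====
-- B's inner loop body: state (best, run, prev); 'run = run + 1 if x == prev else 1', 'prev = x',
-- 'if run > best: best = run'.
def pvStep (s : Int × Int × Option Int) (x : Int) : Int × Int × Option Int :=
  let run := if some x = s.2.2 then s.2.1 + 1 else 1
  let best := if run > s.1 then run else s.1
  (best, run, some x)

-- 'arr[r:n:k]' is PySem.List.slice?; it is none only for step 0, and the loop body only runs for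
-- r ∈ range(k), which forces k ≥ 1, so the '.getD []' default is never taken.
def find_min_operations_alt (arr : List Int) (n : Int) (k : Int) : Int :=
  (PySem.List.pyRange 0 k 1).foldl (fun operations r =>
    let g := PySem.List.sorted ((PySem.List.slice? arr (some r) (some n) k).getD []) (fun x => x) false
    let scan := g.foldl pvStep (0, 0, none)
    operations + ((g.length : Int) - scan.1)) 0

-- ===== PRECONDITION & SPEC =====
-- Pre_ excludes (for k ≥ 1) n > arr.length, where A raises IndexError on arr[j], and (for k ≥ 1)
-- -arr.length < n < 0, a corner outside n's meaning as an element count, where A returns 0 from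
-- empty ranges while B's Python slice arr[r:n:k] counts the negative stop from the end of the
-- list (for n ≤ -arr.length the slices are empty as well and equality is proved).
def Pre_find_min_operations (arr : List Int) (n : Int) (k : Int) : Prop :=
  k ≤ 0 ∨ (0 ≤ n ∧ n ≤ (arr.length : Int)) ∨ n ≤ -(arr.length : Int)
instance (arr : List Int) (n : Int) (k : Int) : Decidable (Pre_find_min_operations arr n k) := by
  unfold Pre_find_min_operations; infer_instance

def pvWitness_find_min_operations : List Int × Int × Int := ([1, 2, 1, 3, 2, 1], 6, 2)

def Spec_find_min_operations (arr : List Int) (n : Int) (k : Int) (out : Int) : Prop := out = find_min_operations_alt arr n k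
instance (arr : List Int) (n : Int) (k : Int) (out : Int) : Decidable (Spec_find_min_operations arr n k out) := by unfold Spec_find_min_operations; infer_instance

-- ===== CLAIM (what is proved, stated in full; the proofs are below) =====
def Claim_equal_find_min_operations : Prop := ∀ (arr : List Int) (n : Int) (k : Int), Dom_find_min_operations arr n k → Pre_find_min_operations arr n k → Spec_find_min_operations arr n k (find_min_operations arr n k)

-- ===== LEMMAS AND PROOFS =====

-- A's first-max scan over the items of a frequency dict.
def pvScan (l : List (Int × Int)) : Int × Int :=
  l.foldl (fun mn kv => if kv.2 > mn.1 then (kv.2, kv.1) else mn) (0, 0)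

-- A's per-residue contribution, as a function of the list of grouped values.
def pvCA (m : List Int) : Int :=
  ((PySem.Dict.counter m).items.filter
      (fun kv => decide (kv.1 ≠ (pvScan (PySem.Dict.counter m).items).2))).map (·.2) |>.sum

-- total minus max multiplicity, as a function of the list of grouped values.
def pvC (m : List Int) : Int :=
  (PySem.Dict.counter m : PySem.Dict Int Int).values.sum -
    ((PySem.List.max? (PySem.Dict.counter m : PySem.Dict Int Int).values (fun x => x)).getD 0)

-- B's per-residue longest-run result on a group list.
def pvBest (g : List Int) : Int := (g.foldl pvStep (0, 0, none)).1

lemma pvScan_inv (l : List (Int × Int)) (a : Int × Int) :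
    (l.foldl (fun mn kv => if kv.2 > mn.1 then (kv.2, kv.1) else mn) a = a ∨
      ((l.foldl (fun mn kv => if kv.2 > mn.1 then (kv.2, kv.1) else mn) a).2,
       (l.foldl (fun mn kv => if kv.2 > mn.1 then (kv.2, kv.1) else mn) a).1) ∈ l) ∧
    a.1 ≤ (l.foldl (fun mn kv => if kv.2 > mn.1 then (kv.2, kv.1) else mn) a).1 ∧
    ∀ p ∈ l, p.2 ≤ (l.foldl (fun mn kv => if kv.2 > mn.1 then (kv.2, kv.1) else mn) a).1 := by
  induction l generalizing a with
  | nil => simp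
  | cons kv t ih =>
    simp only [List.foldl_cons]
    obtain ⟨h1, h2, h3⟩ := ih (if kv.2 > a.1 then (kv.2, kv.1) else a)
    by_cases hc : kv.2 > a.1
    · simp only [if_pos hc] at h1 h2 h3 ⊢
      refine ⟨?_, ?_, ?_⟩
      · rcases h1 with h | h
        · exact Or.inr (by rw [h]; exact List.mem_cons_self ..)
        · exact Or.inr (List.mem_cons_of_mem _ h)
      · omega
      · intro p hp
        rcases List.mem_cons.mp hp with rfl | hp
        · simpa using h2
        · exact h3 p hp
    · simp only [if_neg hc] at h1 h2 h3 ⊢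
      refine ⟨?_, h2, ?_⟩
      · rcases h1 with h | h
        · exact Or.inl h
        · exact Or.inr (List.mem_cons_of_mem _ h)
      · intro p hp
        rcases List.mem_cons.mp hp with rfl | hp
        · omega
        · exact h3 p hp

lemma pvCA_eq_pvC (m : List Int) : pvCA m = pvC m := by
  rcases List.eq_nil_or_concat m with rfl | ⟨_, _, _⟩
  · rfl
  · -- m ≠ []
    have hm : m ≠ [] := by rename_i h; rw [h]; simp
    unfold pvCA pvC pvScan
    set items := (PySem.Dict.counter m : PySem.Dict Int Int).items with hitems
    have hitems_eq : items = (PySem.Set.ofList m).map (fun x => (x, (m.count x : Int))) :=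
      PySem.Dict.items_counter m
    have hvalues : (PySem.Dict.counter m : PySem.Dict Int Int).values = items.map (·.2) := rfl
    set r := items.foldl (fun mn kv => if kv.2 > mn.1 then (kv.2, kv.1) else mn) (0, 0) with hr
    obtain ⟨h1, h2, h3⟩ := pvScan_inv items (0, 0)
    have hpos : ∀ p ∈ items, 0 < p.2 := by
      intro p hp
      rw [hitems_eq] at hp
      obtain ⟨x, hx, rfl⟩ := List.mem_map.mp hp
      have hxm : x ∈ m := (PySem.Set.mem_ofList m x).mp hx
      have : 1 ≤ m.count x := List.one_le_count_iff.mpr hxm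
      simp only []
      exact_mod_cast this
    have hsne : PySem.Set.ofList m ≠ [] := by
      intro hcon
      obtain ⟨x, hx⟩ := List.exists_mem_of_ne_nil m hm
      have := (PySem.Set.mem_ofList m x).mpr hx
      rw [hcon] at this
      simp at this
    have hine : items ≠ [] := by
      rw [hitems_eq]
      simpa using hsne
    obtain ⟨p₀, hp₀⟩ := List.exists_mem_of_ne_nil items hine
    have hr1pos : 0 < r.1 := lt_of_lt_of_le (hpos p₀ hp₀) (h3 p₀ hp₀)
    have hmem : (r.2, r.1) ∈ items := by
      rcases h1 with h | h
      · rw [← hr] at h; rw [h] at hr1pos; simp at hr1pos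
      · exact h
    -- r.2 is a key with count r.1
    have hkey : r.2 ∈ PySem.Set.ofList m ∧ (m.count r.2 : Int) = r.1 := by
      rw [hitems_eq] at hmem
      obtain ⟨x, hx, hxe⟩ := List.mem_map.mp hmem
      obtain ⟨he1, he2⟩ := Prod.mk.injEq .. |>.mp hxe
      subst he1
      exact ⟨hx, he2⟩
    -- the max of the multiplicities
    obtain ⟨y, s', hys⟩ := List.exists_cons_of_ne_nil hsne
    have hvs : (PySem.Dict.counter m : PySem.Dict Int Int).values
        = (PySem.Set.ofList m).map (fun x => (m.count x : Int)) := by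
      rw [hvalues, hitems_eq, List.map_map]
      rfl
    have hvcons : (PySem.Dict.counter m : PySem.Dict Int Int).values
        = ((m.count y : Int)) :: s'.map (fun x => (m.count x : Int)) := by
      rw [hvs, hys, List.map_cons]
    set M := (s'.map (fun x => (m.count x : Int))).foldl max ((m.count y : Int)) with hM
    have hmaxsome : PySem.List.max? (PySem.Dict.counter m : PySem.Dict Int Int).values (fun x => x)
        = some M := by
      rw [hvcons]
      exact PySem.List.max?_id_cons _ _
    have hMmax : ∀ v ∈ (PySem.Dict.counter m : PySem.Dict Int Int).values, v ≤ M := by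
      intro v hv
      simpa using PySem.List.max?_isMax hmaxsome v hv
    have hMmem : M ∈ (PySem.Dict.counter m : PySem.Dict Int Int).values :=
      PySem.List.max?_mem hmaxsome
    have hvalmem : ∀ v, v ∈ (PySem.Dict.counter m : PySem.Dict Int Int).values ↔
        ∃ p ∈ items, p.2 = v := by
      intro v
      rw [hvalues, List.mem_map]
    have hMr : M = r.1 := by
      have h1' : M ≤ r.1 := by
        obtain ⟨p, hp, hpv⟩ := (hvalmem M).mp hMmem
        rw [← hpv]; exact h3 p hp
      have h2' : r.1 ≤ M := hMmax r.1 ((hvalmem r.1).mpr ⟨(r.2, r.1), hmem, rfl⟩)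
      omega
    -- the left-hand side: remove the key r.2 from the sum
    have hfil : items.filter (fun kv => decide (kv.1 ≠ r.2))
        = ((PySem.Set.ofList m).filter (fun x => decide (x ≠ r.2))).map
            (fun x => (x, (m.count x : Int))) := by
      rw [hitems_eq, List.filter_map]
      rfl
    have herase : (PySem.Set.ofList m).filter (fun x => decide (x ≠ r.2))
        = (PySem.Set.ofList m).erase r.2 := by
      have := ((PySem.Set.nodup_ofList m).erase_eq_filter r.2).symm
      simpa [bne_iff_ne] using this
    have hperm : (PySem.Set.ofList m).Perm (r.2 :: (PySem.Set.ofList m).erase r.2) :=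
      List.perm_cons_erase hkey.1
    have hsum : ((PySem.Set.ofList m).map (fun x => (m.count x : Int))).sum
        = (m.count r.2 : Int) + (((PySem.Set.ofList m).erase r.2).map (fun x => (m.count x : Int))).sum := by
      have := (hperm.map (fun x => (m.count x : Int))).sum_eq
      simpa using this
    rw [hfil, herase, List.map_map]
    have hmapcomp : ((fun p : Int × Int => p.2) ∘ fun x => (x, (m.count x : Int)))
        = fun x => (m.count x : Int) := rfl
    rw [hmapcomp, hmaxsome, hvs]
    simp only [Option.getD_some]
    omega

lemma pvA_eq (arr : List Int) (n k : Int) :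
    find_min_operations arr n k =
      ((PySem.List.pyRange 0 k 1).map (fun i =>
        pvCA ((PySem.List.pyRange i n k).map (fun j => PySem.List.pyGetD arr j 0)))).sum := by
  unfold find_min_operations
  have hbody : ∀ (operations i : Int),
      (let freq : PySem.Dict Int Int :=
        (PySem.List.pyRange i n k).foldl (fun freq j =>
          freq.insert (PySem.List.pyGetD arr j 0) (freq.getD (PySem.List.pyGetD arr j 0) 0 + 1))
          PySem.Dict.empty
      let mn : Int × Int :=
        freq.items.foldl (fun mn kv => if kv.2 > mn.1 then (kv.2, kv.1) else mn) (0, 0)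
      freq.items.foldl (fun operations kv => if kv.1 ≠ mn.2 then operations + kv.2 else operations)
        operations) =
      operations + pvCA ((PySem.List.pyRange i n k).map (fun j => PySem.List.pyGetD arr j 0)) := by
    intro operations i
    have hfreq : (PySem.List.pyRange i n k).foldl (fun freq j =>
          freq.insert (PySem.List.pyGetD arr j 0) (freq.getD (PySem.List.pyGetD arr j 0) 0 + 1))
          PySem.Dict.empty
        = PySem.Dict.counter ((PySem.List.pyRange i n k).map (fun j => PySem.List.pyGetD arr j 0)) := by
      rw [← PySem.Dict.foldl_insert_getD_add_one_eq_counter, List.foldl_map]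
    simp only [hfreq]
    rw [PySem.List.foldl_ite_eq_foldl_filter, PySem.List.foldl_add]
    rfl
  simp only [hbody]
  rw [PySem.List.foldl_add, zero_add]

lemma pvB_eq (arr : List Int) (n k : Int) :
    find_min_operations_alt arr n k =
      ((PySem.List.pyRange 0 k 1).map (fun r =>
        ((PySem.List.sorted ((PySem.List.slice? arr (some r) (some n) k).getD []) (fun x => x) false).length : Int)
          - pvBest (PySem.List.sorted ((PySem.List.slice? arr (some r) (some n) k).getD []) (fun x => x) false))).sum := by
  unfold find_min_operations_alt
  rw [PySem.List.foldl_add, zero_add]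
  rfl

-- scanning a run of c copies of x with prev already x
lemma pvRun_inner (c : Nat) (x : Int) :
    ∀ (b r : Int), r ≤ b →
      List.foldl pvStep (b, r, some x) (List.replicate c x) = (max b (r + c), r + c, some x) := by
  induction c with
  | zero =>
    intro b r hrb
    simp only [List.replicate, List.foldl_nil]
    have : max b (r + (0 : Nat)) = b := by omega
    rw [this]; norm_num
  | succ c ih =>
    intro b r hrb
    rw [List.replicate_succ, List.foldl_cons]
    have hstep : pvStep (b, r, some x) x = (max b (r + 1), r + 1, some x) := by
      simp only [pvStep, if_true, Prod.mk.injEq, and_true]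
      split_ifs <;> omega
    rw [hstep, ih (max b (r + 1)) (r + 1) (by omega)]
    have h1 : max (max b (r + 1)) (r + 1 + c) = max b (r + (c + 1 : Nat)) := by
      push_cast; omega
    have h2 : r + 1 + (c : Int) = r + ((c + 1 : Nat) : Int) := by push_cast; omega
    rw [h1, h2]

-- scanning a fresh run of c ≥ 1 copies of x
lemma pvRun (c : Nat) (x : Int) (b r : Int) (prev : Option Int)
    (hprev : prev ≠ some x) (hc : 1 ≤ c) :
    List.foldl pvStep (b, r, prev) (List.replicate c x) = (max b (c : Int), (c : Int), some x) := by
  obtain ⟨c', rfl⟩ : ∃ c', c = c' + 1 := ⟨c - 1, by omega⟩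
  rw [List.replicate_succ, List.foldl_cons]
  have hneg : ¬ (some x = prev) := fun h => hprev (Eq.symm h)
  have hstep : pvStep (b, r, prev) x = (max b 1, 1, some x) := by
    simp only [pvStep, if_neg hneg, Prod.mk.injEq, and_true]
    split_ifs <;> omega
  rw [hstep, pvRun_inner c' x (max b 1) 1 (by omega)]
  have h1 : max (max b 1) (1 + c') = max b (c' + 1 : Nat) := by push_cast; omega
  have h2 : (1 : Int) + c' = ((c' + 1 : Nat) : Int) := by push_cast; omega
  rw [h1, h2]

-- a sorted nonempty list starts with the full block of its head
lemma pvBlock (x : Int) (t : List Int) (hs : List.Pairwise (· ≤ ·) (x :: t)) :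
    ∃ (c : Nat) (g' : List Int), 1 ≤ c ∧ x :: t = List.replicate c x ++ g' ∧
      (∀ y ∈ g', x < y) ∧ (x :: t).count x = c ∧ List.Pairwise (· ≤ ·) g' := by
  induction t with
  | nil =>
    exact ⟨1, [], by omega, rfl, by simp, by simp, List.Pairwise.nil⟩
  | cons x' t' ih =>
    have hx_le : ∀ y ∈ x' :: t', x ≤ y := fun y hy => List.rel_of_pairwise_cons hs hy
    have hs' : List.Pairwise (· ≤ ·) (x' :: t') := hs.of_cons
    by_cases hxx : x' = x
    · subst hxx
      obtain ⟨c, g', hc, heq, hlt, hcount, hpw⟩ := ih hs'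
      refine ⟨c + 1, g', by omega, ?_, hlt, ?_, hpw⟩
      · rw [List.replicate_succ, List.cons_append, ← heq]
      · rw [List.count_cons_self, hcount]
    · refine ⟨1, x' :: t', le_refl 1, by simp, ?_, ?_, hs'⟩
      · intro y hy
        rcases List.mem_cons.mp hy with rfl | hy'
        · exact lt_of_le_of_ne (hx_le y (List.mem_cons_self ..)) (fun h => hxx h.symm)
        · exact lt_of_lt_of_le
            (lt_of_le_of_ne (hx_le x' (List.mem_cons_self ..)) (fun h => hxx h.symm))
            (List.rel_of_pairwise_cons hs' hy')
      · rw [List.count_cons_self]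
        have : (x' :: t').count x = 0 := by
          rw [List.count_eq_zero]
          intro hmem
          rcases List.mem_cons.mp hmem with rfl | hmem'
          · exact hxx rfl
          · exact absurd rfl (ne_of_gt (lt_of_lt_of_le
              (lt_of_le_of_ne (hx_le x' (List.mem_cons_self ..)) (fun h => hxx h.symm))
              (List.rel_of_pairwise_cons hs' hmem'))).elim
        omega

-- the run scan of a sorted list computes the maximal multiplicity (bounds + attainment)
lemma pvScanSpec (N : Nat) :
    ∀ (g : List Int), g.length ≤ N → List.Pairwise (· ≤ ·) g →
      ∀ (b r : Int) (prev : Option Int), 0 ≤ b → (∀ y ∈ g, some y ≠ prev) →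
        b ≤ (g.foldl pvStep (b, r, prev)).1 ∧
        (∀ y : Int, ((g.count y : Int)) ≤ (g.foldl pvStep (b, r, prev)).1) ∧
        ((g.foldl pvStep (b, r, prev)).1 = b ∨
          ∃ y ∈ g, (g.foldl pvStep (b, r, prev)).1 = (g.count y : Int)) := by
  induction N with
  | zero =>
    intro g hlen _ b r prev hb _
    have : g = [] := List.eq_nil_of_length_eq_zero (by omega)
    subst this
    refine ⟨le_refl b, ?_, Or.inl rfl⟩
    intro y; simp only [List.foldl_nil, List.count_nil]; omega
  | succ N ih =>
    intro g hlen hs b r prev hb hprev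
    cases g with
    | nil =>
      refine ⟨le_refl b, ?_, Or.inl rfl⟩
      intro y; simp only [List.foldl_nil, List.count_nil]; omega
    | cons x t =>
      obtain ⟨c, g', hc, heq, hlt, hcount, hpw⟩ := pvBlock x t hs
      rw [heq, List.foldl_append]
      rw [pvRun c x b r prev (fun h => hprev x (List.mem_cons_self ..) h.symm) hc]
      have hlen' : g'.length ≤ N := by
        have := congrArg List.length heq
        simp only [List.length_cons, List.length_append, List.length_replicate] at this
        simp only [List.length_cons] at hlen
        omega
      have hprev' : ∀ y ∈ g', some y ≠ some x := by
        intro y hy h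
        exact absurd (Option.some.inj h) (ne_of_gt (hlt y hy))
      obtain ⟨h1, h2, h3⟩ := ih g' hlen' hpw (max b c) c (some x) (by omega) hprev'
      set R := (g'.foldl pvStep (max b (c : Int), (c : Int), some x)).1 with hR
      refine ⟨by omega, ?_, ?_⟩
      · intro y
        rw [List.count_append]
        by_cases hyx : y = x
        · subst hyx
          have hz : g'.count y = 0 := by
            rw [List.count_eq_zero]; intro hmem
            exact absurd rfl (ne_of_gt (hlt y hmem)).elim
          have hrep : (List.replicate c y).count y = c := by
            simp
          rw [hz, hrep]; omega
        · have hrep : (List.replicate c x).count y = 0 := by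
            simp [List.count_replicate, Ne.symm hyx]
          have h2y := h2 y
          rw [hrep]; omega
      · rcases h3 with h | ⟨y, hy, hRy⟩
        · by_cases hcb : (c : Int) ≤ b
          · left; omega
          · right
            refine ⟨x, List.mem_append_left _ (List.mem_replicate.mpr ⟨by omega, rfl⟩), ?_⟩
            rw [List.count_append]
            have hz : g'.count x = 0 := by
              rw [List.count_eq_zero]; intro hmem
              exact absurd rfl (ne_of_gt (hlt x hmem)).elim
            have hrep : (List.replicate c x).count x = c := by
              simp
            rw [hz, hrep]; omega
        · right
          have hyx : y ≠ x := fun h => absurd rfl (ne_of_gt (h ▸ hlt y hy)).elim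
          refine ⟨y, List.mem_append_right _ hy, ?_⟩
          rw [List.count_append]
          have hrep : (List.replicate c x).count y = 0 := by
            simp [List.count_replicate, Ne.symm hyx]
          rw [hrep]; omega

-- max multiplicity via the counter's values equals B's longest sorted run
lemma pvMaxEq (m : List Int) :
    ((PySem.List.max? (PySem.Dict.counter m : PySem.Dict Int Int).values (fun x => x)).getD 0)
      = pvBest (PySem.List.sorted m (fun x => x) false) := by
  have hvs : (PySem.Dict.counter m : PySem.Dict Int Int).values
      = (PySem.Set.ofList m).map (fun x => (m.count x : Int)) := by
    have : (PySem.Dict.counter m : PySem.Dict Int Int).values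
        = (PySem.Dict.counter m : PySem.Dict Int Int).items.map (·.2) := rfl
    rw [this, PySem.Dict.items_counter, List.map_map]
    rfl
  rcases List.eq_nil_or_concat m with rfl | ⟨_, _, hm'⟩
  · rfl
  · have hm : m ≠ [] := by rw [hm']; simp
    set g := PySem.List.sorted m (fun x => x) false with hg
    have hgs : List.Pairwise (· ≤ ·) g := by
      have := PySem.List.sorted_pairwise m (fun x => x)
      simpa using this
    have hgperm : g.Perm m := PySem.List.sorted_perm m (fun x => x) false
    have hgcount : ∀ y : Int, g.count y = m.count y := fun y => hgperm.count_eq y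
    obtain ⟨h1, h2, h3⟩ := pvScanSpec g.length g (le_refl _) hgs 0 0 none (le_refl 0)
      (fun y _ => by simp)
    set R := (g.foldl pvStep (0, 0, none)).1 with hRdef
    have hRbest : pvBest g = R := rfl
    -- the max? side
    have hsne : PySem.Set.ofList m ≠ [] := by
      intro hcon
      obtain ⟨x, hx⟩ := List.exists_mem_of_ne_nil m hm
      have := (PySem.Set.mem_ofList m x).mpr hx
      rw [hcon] at this; simp at this
    have hvne : (PySem.Dict.counter m : PySem.Dict Int Int).values ≠ [] := by
      rw [hvs]; simpa using hsne
    obtain ⟨M, hmax⟩ : ∃ M, PySem.List.max?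
        (PySem.Dict.counter m : PySem.Dict Int Int).values (fun x => x) = some M := by
      cases hmx : PySem.List.max? (PySem.Dict.counter m : PySem.Dict Int Int).values (fun x => x) with
      | none => exact absurd ((PySem.List.max?_eq_none_iff _ _).mp hmx) hvne
      | some M => exact ⟨M, rfl⟩
    have hMmem : M ∈ (PySem.Dict.counter m : PySem.Dict Int Int).values := PySem.List.max?_mem hmax
    have hMmax : ∀ v ∈ (PySem.Dict.counter m : PySem.Dict Int Int).values, v ≤ M := by
      intro v hv
      simpa using PySem.List.max?_isMax hmax v hv
    rw [hmax, Option.getD_some, hRbest]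
    -- M ≤ R
    obtain ⟨x₀, _, hx₀⟩ := List.mem_map.mp (hvs ▸ hMmem)
    have hMR : M ≤ R := by
      rw [← hx₀, ← hgcount x₀]
      exact h2 x₀
    -- R ≤ M
    have hRM : R ≤ M := by
      rcases h3 with h | ⟨y, hy, hRy⟩
      · have : (0 : Int) ≤ M := le_trans (by rw [← hx₀]; exact_mod_cast Nat.zero_le _) (le_refl M)
        omega
      · have hym : y ∈ m := hgperm.subset hy
        have : (m.count y : Int) ∈ (PySem.Dict.counter m : PySem.Dict Int Int).values := by
          rw [hvs]
          exact List.mem_map.mpr ⟨y, (PySem.Set.mem_ofList m y).mpr hym, rfl⟩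
        have := hMmax _ this
        rw [hRy, hgcount y]
        omega
    omega

-- sum of the counter's values is the length of the list
lemma pvSumEq (m : List Int) :
    (PySem.Dict.counter m : PySem.Dict Int Int).values.sum = (m.length : Int) := by
  have hvs : (PySem.Dict.counter m : PySem.Dict Int Int).values
      = (PySem.Set.ofList m).map (fun x => (m.count x : Int)) := by
    have : (PySem.Dict.counter m : PySem.Dict Int Int).values
        = (PySem.Dict.counter m : PySem.Dict Int Int).items.map (·.2) := rfl
    rw [this, PySem.Dict.items_counter, List.map_map]
    rfl
  have hperm : (PySem.Set.ofList m).Perm m.dedup := by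
    rw [List.perm_ext_iff_of_nodup (PySem.Set.nodup_ofList m) (List.nodup_dedup m)]
    intro x
    rw [PySem.Set.mem_ofList, List.mem_dedup]
  rw [hvs, (hperm.map (fun x => (m.count x : Int))).sum_eq]
  have : (m.dedup.map (fun x => (m.count x : Int)))
      = (m.dedup.map (fun x => m.count x)).map (fun c : Nat => (c : Int)) := by
    rw [List.map_map]; rfl
  rw [this, ← Nat.cast_list_sum, List.sum_map_count_dedup_eq_length]

-- per-group equality: A's contribution = group length − longest sorted run
lemma pvGroup (m : List Int) :
    pvCA m = (m.length : Int) - pvBest (PySem.List.sorted m (fun x => x) false) := by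
  rw [pvCA_eq_pvC]
  unfold pvC
  rw [pvSumEq, pvMaxEq]

lemma pvGetD_nonneg (arr : List Int) (i : Int) (h0 : 0 ≤ i) (hlt : i.toNat < arr.length) :
    PySem.List.pyGetD arr i 0 = arr[i.toNat] := by
  have hi : i = ((i.toNat : Nat) : Int) := by omega
  conv_lhs => rw [hi]
  rw [PySem.List.pyGetD_natCast, List.getD_eq_getElem _ _ hlt]

-- arr[r:n:k] for 0 ≤ r, 0 < k, 0 ≤ n ≤ len(arr) is exactly the strided-index gather
lemma pvSlice (arr : List Int) (n k r : Int) (hk : 0 < k) (hr : 0 ≤ r)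
    (hn0 : 0 ≤ n) (hn : n ≤ (arr.length : Int)) :
    PySem.List.slice? arr (some r) (some n) k
      = some ((PySem.List.pyRange r n k).map (fun j => PySem.List.pyGetD arr j 0)) := by
  unfold PySem.List.slice? PySem.List.sliceIndices
  rw [if_neg (by omega)]
  simp only [if_neg (by omega : ¬ k < 0)]
  rw [if_neg (by omega : ¬ r < 0), if_neg (by omega : ¬ n < 0)]
  have hstop : min n (arr.length : Int) = n := by omega
  rw [hstop]
  by_cases hrn : r < n
  · have hstart : min r (arr.length : Int) = r := by omega
    rw [hstart]
    rw [if_pos hk, if_pos hrn]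
    rw [PySem.List.pyRange_of_pos r n hk, if_pos hrn, List.map_map]
    congr 1
    set C := ((n - r + k - 1) / k).toNat with hC
    have hmem : ∀ j ∈ List.range C, r + k * (j : Int) < n ∧ 0 ≤ r + k * (j : Int) := by
      intro j hj
      have hin : r + k * (j : Int) ∈ PySem.List.pyRange r n k := by
        rw [PySem.List.pyRange_of_pos r n hk, if_pos hrn]
        exact List.mem_map.mpr ⟨j, hj, rfl⟩
      obtain ⟨ha, hb, -⟩ := (PySem.List.mem_pyRange_iff_of_pos hk _).mp hin
      exact ⟨hb, by omega⟩
    rw [List.filterMap_eq_map_iff_forall_eq_some]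
    intro j hj
    obtain ⟨hlt, hge⟩ := hmem j hj
    have hidx : (r + k * (j : Int)).toNat < arr.length := by omega
    rw [List.getElem?_eq_getElem hidx]
    simp only [Function.comp]
    rw [pvGetD_nonneg arr _ (by omega) hidx]
  · rw [if_pos hk]
    have hse : ¬ min r (arr.length : Int) < n := by omega
    rw [if_neg hse]
    rw [PySem.List.pyRange_of_pos r n hk, if_neg hrn]
    simp

-- for n ≤ -len(arr), arr[r:n:k] is empty (the clamped stop is 0 ≤ start)
lemma pvSliceEmpty (arr : List Int) (n k r : Int) (hk : 0 < k) (hr : 0 ≤ r)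
    (hn : n ≤ -(arr.length : Int)) :
    PySem.List.slice? arr (some r) (some n) k = some [] := by
  unfold PySem.List.slice? PySem.List.sliceIndices
  rw [if_neg (by omega)]
  simp only [if_neg (show ¬ k < 0 by omega)]
  rw [if_neg (show ¬ r < 0 by omega)]
  by_cases hn0 : n < 0
  · rw [if_pos hn0]
    have h1 : max (n + (arr.length : Int)) 0 = 0 := by omega
    rw [h1, if_pos hk, if_neg (show ¬ min r (arr.length : Int) < 0 by omega)]
    simp
  · rw [if_neg hn0]
    have hmin : min n (arr.length : Int) = 0 := by omega
    rw [hmin, if_pos hk, if_neg (show ¬ min r (arr.length : Int) < 0 by omega)]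
    simp

lemma pvMain (arr : List Int) (n k : Int)
    (hpre : k ≤ 0 ∨ (0 ≤ n ∧ n ≤ (arr.length : Int)) ∨ n ≤ -(arr.length : Int)) :
    find_min_operations arr n k = find_min_operations_alt arr n k := by
  rw [pvA_eq, pvB_eq]
  by_cases hk : 0 < k
  · rcases hpre with hkle | ⟨hn0, hn⟩ | hneg
    · omega
    · congr 1
      apply List.map_congr_left
      intro r hr
      obtain ⟨hr0, hrk⟩ := PySem.List.mem_pyRange_one.mp hr
      rw [pvSlice arr n k r hk hr0 hn0 hn]
      simp only [Option.getD_some]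
      rw [pvGroup]
      congr 1
      have := (PySem.List.sorted_perm
        ((PySem.List.pyRange r n k).map (fun j => PySem.List.pyGetD arr j 0))
        (fun x => x) false).length_eq
      rw [this]
    · congr 1
      apply List.map_congr_left
      intro r hr
      obtain ⟨hr0, hrk⟩ := PySem.List.mem_pyRange_one.mp hr
      rw [pvSliceEmpty arr n k r hk hr0 hneg]
      have hrng : PySem.List.pyRange r n k = [] := by
        rw [PySem.List.pyRange_of_pos r n hk, if_neg (by omega)]
        simp
      rw [hrng]
      rfl
  · rw [PySem.List.pyRange_one_eq_nil (by omega : k ≤ 0)]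
    rfl

-- ===== VERDICT (by name: the statement is the Claim_ definition above) =====
theorem find_min_operations_spec : Claim_equal_find_min_operations := by
  intro arr n k _ hpre
  unfold Spec_find_min_operations
  exact pvMain arr n k hpre
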